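-- pv_equiv track=rewrite | github.com/EnchantedPl/AI-CS | app/cache/cache_orchestrator.py | _parse_citation_refs
-- ===== SOURCE A (Python) =====
-- from typing import Any, Dict, List, Optional, Tuple
--
-- def _parse_citation_refs(citations: List[str]) -> Tuple[List[str], List[str]]:
--     source_doc_ids: List[str] = []
--     source_chunk_ids: List[str] = []
--     for c in citations:
--         if not c:
--             continue
--         parts = c.split("#", 1)
--         if parts[0]:
--             source_doc_ids.append(parts[0])
--         if len(parts) > 1 and parts[1]:
--             source_chunk_ids.append(parts[1])
--     return sorted(set(source_doc_ids)), sorted(set(source_chunk_ids))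
-- ===== SOURCE B (Python) =====
-- def _ins(xs, x):
--     # ordered insertion into a strictly increasing list, skipping duplicates;
--     # the insertion point is found by a hand-written binary search
--     lo, hi = 0, len(xs)
--     while lo < hi:
--         mid = (lo + hi) // 2
--         if xs[mid] < x:
--             lo = mid + 1
--         else:
--             hi = mid
--     if lo < len(xs) and xs[lo] == x:
--         return xs
--     xs.insert(lo, x)
--     return xs
--
--
-- def _parse_citation_refs(citations):
--     # single streaming pass: keep both outputs sorted & duplicate-free at all
--     # times by ordered insertion (no set(), no final sort); parse via str.find
--     docs = []
--     chunks = []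
--     for c in citations:
--         i = c.find('#')
--         if i < 0:
--             if c:
--                 docs = _ins(docs, c)
--         else:
--             head = c[:i]
--             tail = c[i + 1:]
--             if head:
--                 docs = _ins(docs, head)
--             if tail:
--                 chunks = _ins(chunks, tail)
--     return docs, chunks
-- ===== Notes on version B (the rewrite author's own statement) =====
-- stated objective: alternative
-- what changed: B is a single streaming pass that keeps both result lists sorted and duplicate-free at every step by binary-search ordered insertion (no set(), no sorted()), and parses each citation with str.find plus slicing instead of split('#',1).
import Mathlib
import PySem

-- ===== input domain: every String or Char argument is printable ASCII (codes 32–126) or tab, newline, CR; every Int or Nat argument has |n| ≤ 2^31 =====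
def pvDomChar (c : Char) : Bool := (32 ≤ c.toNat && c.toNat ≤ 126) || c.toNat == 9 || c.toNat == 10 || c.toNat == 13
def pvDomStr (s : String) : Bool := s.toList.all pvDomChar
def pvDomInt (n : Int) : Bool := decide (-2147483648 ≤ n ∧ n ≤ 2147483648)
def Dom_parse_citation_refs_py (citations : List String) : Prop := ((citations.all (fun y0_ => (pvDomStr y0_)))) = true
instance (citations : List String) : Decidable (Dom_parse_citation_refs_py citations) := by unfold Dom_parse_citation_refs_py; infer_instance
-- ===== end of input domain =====

-- B replaces A's collect-then-set()-then-sorted() pipeline by a single streaming pass that keeps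
-- both result lists sorted and duplicate-free at every step via binary-search ordered insertion, parsing each
-- citation with str.find plus slicing instead of split('#',1) (objective: alternative; same value).

-- ===== PORT A =====
def parse_citation_refs_py (citations : List String) : List String × List String :=
  let st := citations.foldl
    (fun (acc : List String × List String) c =>
      if c = "" then acc
      else
        let parts : List String := (PySem.Str.splitMax? c "#" 1).getD []
        let ids := if PySem.List.pyGetD parts 0 "" ≠ "" then acc.1 ++ [PySem.List.pyGetD parts 0 ""] else acc.1
        let chunks := if 1 < parts.length ∧ PySem.List.pyGetD parts 1 "" ≠ "" then acc.2 ++ [PySem.List.pyGetD parts 1 ""] else acc.2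
        (ids, chunks))
    ([], [])
  (PySem.List.sorted (PySem.Set.ofList st.1) (fun x => x) false,
   PySem.List.sorted (PySem.Set.ofList st.2) (fun x => x) false)

-- ===== PORT B =====
-- Source B's _ins, binary-search part: the while-loop on (lo, hi); Python's (lo+hi)//2 on these
-- non-negative ints is exactly Nat division, and xs[mid] (always in range: mid < hi ≤ len) is
-- ported as pyGetD with an unreachable default
def pvBS (xs : List String) (x : String) (lo hi : Nat) : Nat :=
  if lo < hi then
    let mid := (lo + hi) / 2
    if PySem.List.pyGetD xs (mid : Int) "" < x then pvBS xs x (mid + 1) hi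
    else pvBS xs x lo mid
  else lo
termination_by hi - lo
decreasing_by all_goals omega

-- Source B's _ins: dup check at the insertion point, then list.insert
def pvIns (xs : List String) (x : String) : List String :=
  let lo := pvBS xs x 0 xs.length
  if lo < xs.length ∧ PySem.List.pyGetD xs (lo : Int) "" = x then xs
  else PySem.List.insert xs (lo : Int) x

def parse_citation_refs_py_alt (citations : List String) : List String × List String :=
  citations.foldl
    (fun (acc : List String × List String) c =>
      let i := PySem.Str.find c "#"
      if i < 0 then
        if c ≠ "" then (pvIns acc.1 c, acc.2) else acc
      else
        let head := PySem.Str.slice c none (some i)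
        let tail := PySem.Str.slice c (some (i + 1)) none
        (if head ≠ "" then pvIns acc.1 head else acc.1,
         if tail ≠ "" then pvIns acc.2 tail else acc.2))
    ([], [])

-- ===== PRECONDITION & SPEC =====
def Spec_parse_citation_refs_py (citations : List String) (out : List String × List String) : Prop := out = parse_citation_refs_py_alt citations
instance (citations : List String) (out : List String × List String) : Decidable (Spec_parse_citation_refs_py citations out) := by unfold Spec_parse_citation_refs_py; infer_instance

-- ===== CLAIM (what is proved, stated in full; the proofs are below) =====
def Claim_equal_parse_citation_refs_py : Prop := ∀ (citations : List String), Dom_parse_citation_refs_py citations → Spec_parse_citation_refs_py citations (parse_citation_refs_py citations)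

-- ===== LEMMAS AND PROOFS =====

-- proof-side characterisation of splitting at the first '#': head and tail components
def pvPartHash (s : String) : String × String :=
  let cs := s.toList
  let pre := cs.takeWhile (fun ch => ch ≠ '#')
  if '#' ∈ cs then (String.ofList pre, String.ofList (cs.drop (pre.length + 1)))
  else (s, "")

lemma pv_go0 (f : ℕ) (l : List Char) (acc : List (List Char)) (hf : 0 < f) :
    PySem.Chars.splitOnMax.go ['#'] f 0 l [] acc = acc.reverse ++ [l] := by
  obtain ⟨f, rfl⟩ := Nat.exists_eq_succ_of_ne_zero hf.ne'
  cases l with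
  | nil => simp [PySem.Chars.splitOnMax.go]
  | cons c rest => simp [PySem.Chars.splitOnMax.go]

lemma pv_go1 : ∀ (fuel : ℕ) (l cur : List Char) (acc : List (List Char)), l.length < fuel →
    PySem.Chars.splitOnMax.go ['#'] fuel 1 l cur acc =
      acc.reverse ++ (if '#' ∈ l
        then [cur.reverse ++ l.takeWhile (fun ch => ch ≠ '#'),
              l.drop ((l.takeWhile (fun ch => ch ≠ '#')).length + 1)]
        else [cur.reverse ++ l]) := by
  intro fuel
  induction fuel with
  | zero => intro l cur acc h; omega
  | succ f ih =>
    intro l cur acc h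
    cases l with
    | nil => simp [PySem.Chars.splitOnMax.go]
    | cons c rest =>
      by_cases hc : c = '#'
      · subst hc
        have hpre : List.isPrefixOf ['#'] ('#' :: rest) = true := by simp [List.isPrefixOf]
        simp only [PySem.Chars.splitOnMax.go, hpre, if_true]
        norm_num
        rw [pv_go0 f rest (cur.reverse :: acc) (by simp at h; omega)]
        simp
      · have hpre : List.isPrefixOf ['#'] (c :: rest) = false := by
          simp [List.isPrefixOf]; exact fun h' => hc h'.symm
        simp only [PySem.Chars.splitOnMax.go, hpre]
        rw [ih rest (c :: cur) acc (by simp at h; omega)]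
        simp only [List.mem_cons, List.takeWhile]
        have : (c == '#') = false := by simp [hc]
        by_cases hm : '#' ∈ rest
        · simp [hm, hc, List.append_assoc]
        · simp [hm, hc, eq_comm]

lemma pv_split1 (s : String) :
    (PySem.Str.splitMax? s "#" 1).getD [] =
      if '#' ∈ s.toList
      then [String.ofList (s.toList.takeWhile (fun ch => ch ≠ '#')),
            String.ofList (s.toList.drop ((s.toList.takeWhile (fun ch => ch ≠ '#')).length + 1))]
      else [s] := by
  have hsep : ("#" : String).toList = ['#'] := by decide
  simp only [PySem.Str.splitMax?, PySem.Chars.splitMax?, hsep]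
  norm_num [PySem.Chars.splitOnMax]
  have hlen : s.toList.length = s.length := by simp
  rw [pv_go1 (s.length + 1) s.toList [] [] (by omega)]
  by_cases hm : '#' ∈ s.toList
  · simp [hm]
  · simp [hm]

-- A's fold collects the nonempty heads / tails in encounter order
lemma pv_foldA : ∀ (l : List String) (a b : List String),
    l.foldl
      (fun (acc : List String × List String) c =>
        if c = "" then acc
        else
          let parts : List String := (PySem.Str.splitMax? c "#" 1).getD []
          let ids := if PySem.List.pyGetD parts 0 "" ≠ "" then acc.1 ++ [PySem.List.pyGetD parts 0 ""] else acc.1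
          let chunks := if 1 < parts.length ∧ PySem.List.pyGetD parts 1 "" ≠ "" then acc.2 ++ [PySem.List.pyGetD parts 1 ""] else acc.2
          (ids, chunks))
      (a, b) =
    (a ++ (l.map (fun c => (pvPartHash c).1)).filter (fun h => decide (h ≠ "")),
     b ++ (l.map (fun c => (pvPartHash c).2)).filter (fun t => decide (t ≠ ""))) := by
  intro l
  induction l with
  | nil => intro a b; simp
  | cons c l ih =>
    intro a b
    rw [List.foldl_cons, List.map_cons, List.map_cons]
    by_cases hc : c = ""
    · subst hc
      have h1 : pvPartHash "" = ("", "") := by decide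
      simp only [h1, List.filter_cons, ih]
      norm_num
    · simp only [if_neg hc, pv_split1 c]
      by_cases hm : '#' ∈ c.toList
      · have hph : pvPartHash c =
            (String.ofList (c.toList.takeWhile (fun ch => ch ≠ '#')),
             String.ofList (c.toList.drop ((c.toList.takeWhile (fun ch => ch ≠ '#')).length + 1))) := by
          simp [pvPartHash, hm]
        simp only [if_pos hm, hph, ih]
        set h := String.ofList (c.toList.takeWhile (fun ch => ch ≠ '#')) with hh
        set t := String.ofList (c.toList.drop ((c.toList.takeWhile (fun ch => ch ≠ '#')).length + 1)) with ht
        have e0 : PySem.List.pyGetD [h, t] 0 "" = h := by simp [PySem.List.pyGetD]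
        have e1 : PySem.List.pyGetD [h, t] 1 "" = t := by simp [PySem.List.pyGetD]
        rw [e0, e1]
        by_cases h0 : h = "" <;> by_cases t0 : t = "" <;>
          simp [h0, t0, List.append_assoc]
      · have hph : pvPartHash c = (c, "") := by simp [pvPartHash, hm]
        simp only [if_neg hm, hph, ih]
        have e0 : PySem.List.pyGetD [c] 0 "" = c := by simp [PySem.List.pyGetD]
        rw [e0]
        simp [hc, List.append_assoc]

-- singleton infix is membership
lemma pv_inf_mem (l : List Char) : ['#'] <:+: l ↔ '#' ∈ l := by
  constructor
  · intro h; exact h.sublist.subset (List.mem_singleton_self '#')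
  · intro h
    obtain ⟨l1, l2, rfl⟩ := List.append_of_mem h
    exact ⟨l1, l2, by simp⟩

-- find c '#' is the length of the '#'-free prefix, when '#' occurs
lemma pv_find_hash (s : List Char) (hm : '#' ∈ s) :
    PySem.Chars.find s ['#'] = ((s.takeWhile (fun ch => ch ≠ '#')).length : Int) := by
  have hnn : 0 ≤ PySem.Chars.find s ['#'] :=
    (PySem.Chars.find_nonneg_iff s ['#']).2 ((pv_inf_mem s).2 hm)
  obtain ⟨hpre, hmin⟩ := PySem.Chars.find_spec hnn
  set p := (s.takeWhile (fun ch => decide (ch ≠ '#'))).length with hp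
  set q := (PySem.Chars.find s ['#']).toNat with hq
  have hdw : s.drop p = s.dropWhile (fun ch => decide (ch ≠ '#')) := by
    calc s.drop p
        = ((s.takeWhile (fun ch => decide (ch ≠ '#')) ++ s.dropWhile (fun ch => decide (ch ≠ '#')))).drop p := by
          rw [List.takeWhile_append_dropWhile]
      _ = s.dropWhile (fun ch => decide (ch ≠ '#')) := by rw [hp]; exact List.drop_left
  have hdwne : s.dropWhile (fun ch => decide (ch ≠ '#')) ≠ [] := by
    intro h0
    have h1 := List.dropWhile_eq_nil_iff.mp h0 '#' hm
    simp at h1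
  obtain ⟨y, t0, hyt⟩ := List.exists_cons_of_ne_nil hdwne
  have hy : y = '#' := by
    have h1 := List.head_dropWhile_not (p := fun ch => decide (ch ≠ '#')) hdwne
    simp only [hyt, List.head_cons] at h1
    simpa using h1
  have hpre_p : ['#'] <+: s.drop p := by
    rw [hdw, hyt, hy]
    exact ⟨t0, rfl⟩
  have hlt1 : ¬ p < q := fun h => hmin p h hpre_p
  have hlt2 : ¬ q < p := by
    intro hq_lt
    obtain ⟨t, ht⟩ := hpre
    have hqlen : q < s.length := by
      have h1 : (s.drop q).length = (['#'] ++ t).length := by rw [ht]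
      simp at h1; omega
    have hcq : s[q]'hqlen = '#' := by
      have h0 : (s.drop q)[0]'(by rw [← ht]; simp) = '#' := by
        simp [← ht]
      rw [List.getElem_drop] at h0
      simpa using h0
    have hqtw : q < (s.takeWhile (fun ch => decide (ch ≠ '#'))).length := hq_lt
    have hmemtw : (s.takeWhile (fun ch => decide (ch ≠ '#')))[q]'hqtw ∈
        s.takeWhile (fun ch => decide (ch ≠ '#')) := List.getElem_mem _
    have hPel := List.mem_takeWhile_imp hmemtw
    have heq : (s.takeWhile (fun ch => decide (ch ≠ '#')))[q]'hqtw = s[q]'hqlen :=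
      (List.takeWhile_prefix _).getElem hqtw
    rw [heq, hcq] at hPel
    simp at hPel
  have hqp : q = p := by omega
  omega

-- B's fold step, named for the lemmas (definitionally the lambda in the port)
def pvStepFn (acc : List String × List String) (c : String) : List String × List String :=
  let i := PySem.Str.find c "#"
  if i < 0 then
    if c ≠ "" then (pvIns acc.1 c, acc.2) else acc
  else
    let head := PySem.Str.slice c none (some i)
    let tail := PySem.Str.slice c (some (i + 1)) none
    (if head ≠ "" then pvIns acc.1 head else acc.1,
     if tail ≠ "" then pvIns acc.2 tail else acc.2)

-- the step equals the pvPartHash-based conditional insertions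
lemma pv_stepB (D C : List String) (c : String) :
    pvStepFn (D, C) c =
    (if (pvPartHash c).1 ≠ "" then pvIns D (pvPartHash c).1 else D,
     if (pvPartHash c).2 ≠ "" then pvIns C (pvPartHash c).2 else C) := by
  have hsep : ("#" : String).toList = ['#'] := by decide
  by_cases hm : '#' ∈ c.toList
  · have hf : PySem.Str.find c "#" = ((c.toList.takeWhile (fun ch => ch ≠ '#')).length : Int) := by
      rw [PySem.Str.find_eq, hsep, pv_find_hash c.toList hm]
    set p := (c.toList.takeWhile (fun ch => decide (ch ≠ '#'))).length with hp
    have hnotlt : ¬ (PySem.Str.find c "#" < 0) := by rw [hf]; exact not_lt.mpr (Int.natCast_nonneg _)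
    have hhead : PySem.Str.slice c none (some (PySem.Str.find c "#")) =
        String.ofList (c.toList.takeWhile (fun ch => ch ≠ '#')) := by
      apply String.toList_injective
      rw [PySem.Str.toList_slice, PySem.Chars.slice_eq_listSlice, hf]
      rw [PySem.List.slice_to_natCast]
      rw [(List.prefix_iff_eq_take.mp (List.takeWhile_prefix _)).symm]
      simp
    have htail : PySem.Str.slice c (some (PySem.Str.find c "#" + 1)) none =
        String.ofList (c.toList.drop ((c.toList.takeWhile (fun ch => ch ≠ '#')).length + 1)) := by
      apply String.toList_injective
      rw [PySem.Str.toList_slice, PySem.Chars.slice_eq_listSlice, hf]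
      have hc1 : ((p : Int) + 1) = ((p + 1 : ℕ) : Int) := by push_cast; ring
      rw [hc1, PySem.List.slice_from_natCast, String.toList_ofList, hp]
    have hph : pvPartHash c =
        (String.ofList (c.toList.takeWhile (fun ch => ch ≠ '#')),
         String.ofList (c.toList.drop ((c.toList.takeWhile (fun ch => ch ≠ '#')).length + 1))) := by
      simp [pvPartHash, hm]
    simp only [pvStepFn, if_neg hnotlt, hhead, htail, hph]
  · have hf : PySem.Str.find c "#" = -1 := by
      rw [PySem.Str.find_eq, hsep]
      exact (PySem.Chars.find_eq_neg_one_iff c.toList ['#']).2 (fun h => hm ((pv_inf_mem _).1 h))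
    have hph : pvPartHash c = (c, "") := by simp [pvPartHash, hm]
    simp only [pvStepFn, hf, hph]
    norm_num
    by_cases hc : c = ""
    · simp [hc]
    · simp [hc]

lemma pvBS_spec : ∀ (n : ℕ) (xs : List String) (x : String) (lo hi : ℕ), hi - lo ≤ n →
    lo ≤ hi → hi ≤ xs.length → List.Pairwise (· < ·) xs →
    (∀ j (hj : j < xs.length), j < lo → xs[j] < x) →
    (∀ j (hj : j < xs.length), hi ≤ j → ¬ xs[j] < x) →
    lo ≤ pvBS xs x lo hi ∧ pvBS xs x lo hi ≤ hi ∧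
    (∀ j (hj : j < xs.length), j < pvBS xs x lo hi → xs[j] < x) ∧
    (∀ j (hj : j < xs.length), pvBS xs x lo hi ≤ j → ¬ xs[j] < x) := by
  intro n
  induction n with
  | zero =>
    intro xs x lo hi hn hlh hhl _hs hleft hright
    have heq : ¬ lo < hi := by omega
    rw [pvBS, if_neg heq]
    exact ⟨le_rfl, hlh, hleft, fun j hj hle => hright j hj (by omega)⟩
  | succ n ih =>
    intro xs x lo hi hn hlh hhl hs hleft hright
    by_cases h : lo < hi
    · rw [pvBS, if_pos h]
      have hpw := List.pairwise_iff_getElem.mp hs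
      have hmlo : lo ≤ (lo + hi) / 2 := by omega
      have hmhi : (lo + hi) / 2 < hi := by omega
      have hmlen : (lo + hi) / 2 < xs.length := by omega
      have hget : PySem.List.pyGetD xs (((lo + hi) / 2 : ℕ) : Int) "" = xs[(lo + hi) / 2] := by
        rw [PySem.List.pyGetD_eq_getElem xs "" (by positivity) (by exact_mod_cast hmlen)]
        simp only [Int.toNat_natCast]
      simp only [hget]
      by_cases hc : xs[(lo + hi) / 2] < x
      · rw [if_pos hc]
        have hleft' : ∀ j (hj : j < xs.length), j < (lo + hi) / 2 + 1 → xs[j] < x := by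
          intro j hj hjlt
          by_cases hje : j = (lo + hi) / 2
          · subst hje; exact hc
          · exact lt_trans (hpw j ((lo + hi) / 2) hj hmlen (by omega)) hc
        obtain ⟨c1, c2, c3, c4⟩ := ih xs x ((lo + hi) / 2 + 1) hi (by omega) (by omega) hhl hs hleft' hright
        exact ⟨by omega, c2, c3, c4⟩
      · rw [if_neg hc]
        have hright' : ∀ j (hj : j < xs.length), (lo + hi) / 2 ≤ j → ¬ xs[j] < x := by
          intro j hj hjle
          by_cases hje : j = (lo + hi) / 2
          · subst hje; exact hc
          · have hmj : xs[(lo + hi) / 2] < xs[j] := hpw _ _ hmlen hj (by omega)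
            exact fun hlt => hc (lt_trans hmj hlt)
        obtain ⟨c1, c2, c3, c4⟩ := ih xs x lo ((lo + hi) / 2) (by omega) (by omega) (by omega) hs hleft hright'
        exact ⟨c1, by omega, c3, c4⟩
    · rw [pvBS, if_neg h]
      exact ⟨le_rfl, hlh, hleft, fun j hj hle => hright j hj (by omega)⟩

lemma pvIns_spec (xs : List String) (x : String) (hs : List.Pairwise (· < ·) xs) :
    List.Pairwise (· < ·) (pvIns xs x) ∧ ∀ y, y ∈ pvIns xs x ↔ y = x ∨ y ∈ xs := by
  obtain ⟨h1, h2, h3, h4⟩ := pvBS_spec xs.length xs x 0 xs.length (by omega) (by omega) le_rfl hs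
    (fun j hj hlt => absurd hlt (by omega)) (fun j hj hle => absurd hj (by omega))
  set i := pvBS xs x 0 xs.length with hi
  rw [pvIns]
  by_cases hdup : i < xs.length ∧ PySem.List.pyGetD xs (i : Int) "" = x
  · rw [if_pos hdup]
    obtain ⟨hl, he⟩ := hdup
    rw [PySem.List.pyGetD_eq_getElem xs "" (by positivity) (by exact_mod_cast hl)] at he
    simp only [Int.toNat_natCast] at he
    have hx : x ∈ xs := he ▸ List.getElem_mem hl
    exact ⟨hs, fun y => ⟨fun hy => Or.inr hy, fun hy => hy.elim (fun e => e ▸ hx) id⟩⟩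
  · rw [if_neg hdup, PySem.List.insert_natCast xs i x h2]
    have htake : ∀ a ∈ xs.take i, a < x := by
      intro a ha
      obtain ⟨j, hj, rfl⟩ := List.mem_iff_getElem.mp ha
      rw [List.getElem_take]
      exact h3 j (by simp at hj; omega) (by simp at hj; omega)
    have hdrop : ∀ b ∈ xs.drop i, x < b := by
      intro b hb
      obtain ⟨j, hj, rfl⟩ := List.mem_iff_getElem.mp hb
      rw [List.getElem_drop]
      have hjl : i + j < xs.length := by simp at hj; omega
      have hnl : ¬ xs[i + j] < x := h4 (i + j) hjl (by omega)
      rcases lt_or_eq_of_le (not_lt.mp hnl) with hlt | heqx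
      · exact hlt
      · exfalso
        rcases Nat.eq_zero_or_pos j with rfl | hjpos
        · apply hdup
          refine ⟨by omega, ?_⟩
          rw [PySem.List.pyGetD_eq_getElem xs "" (by positivity) (by exact_mod_cast hjl)]
          simp only [Int.toNat_natCast]
          simpa using heqx.symm
        · have hil : i < xs.length := by omega
          have := (List.pairwise_iff_getElem.mp hs) i (i + j) hil hjl (by omega)
          exact h4 i hil le_rfl (lt_of_lt_of_le this (le_of_eq heqx.symm))
    refine ⟨?_, ?_⟩
    · refine List.pairwise_append.mpr ⟨hs.sublist (List.take_sublist i xs), ?_, ?_⟩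
      · exact List.pairwise_cons.mpr ⟨hdrop, hs.sublist (List.drop_sublist i xs)⟩
      · intro a ha b hb
        rcases List.mem_cons.mp hb with rfl | hb'
        · exact htake a ha
        · exact lt_trans (htake a ha) (hdrop b hb')
    · have hsplit : xs.take i ++ xs.drop i = xs := List.take_append_drop i xs
      intro y
      simp only [List.mem_append, List.mem_cons]
      constructor
      · rintro (hy | rfl | hy)
        · exact Or.inr (hsplit ▸ List.mem_append_left _ hy)
        · exact Or.inl rfl
        · exact Or.inr (hsplit ▸ List.mem_append_right _ hy)
      · rintro (rfl | hy)
        · exact Or.inr (Or.inl rfl)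
        · have hy' : y ∈ xs.take i ++ xs.drop i := hsplit.symm ▸ hy
          rcases List.mem_append.mp hy' with h' | h'
          · exact Or.inl h'
          · exact Or.inr (Or.inr h')

-- B's fold keeps both accumulators strictly sorted with the collected members
lemma pv_foldB : ∀ (l : List String) (D C : List String),
    List.Pairwise (· < ·) D → List.Pairwise (· < ·) C →
    List.Pairwise (· < ·) (l.foldl pvStepFn (D, C)).1 ∧
    List.Pairwise (· < ·) (l.foldl pvStepFn (D, C)).2 ∧
    (∀ y, y ∈ (l.foldl pvStepFn (D, C)).1 ↔
        y ∈ D ∨ y ∈ (l.map (fun c => (pvPartHash c).1)).filter (fun h => decide (h ≠ ""))) ∧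
    (∀ y, y ∈ (l.foldl pvStepFn (D, C)).2 ↔
        y ∈ C ∨ y ∈ (l.map (fun c => (pvPartHash c).2)).filter (fun t => decide (t ≠ ""))) := by
  intro l
  induction l with
  | nil => intro D C hD hC; exact ⟨hD, hC, by simp, by simp⟩
  | cons c l ih =>
    intro D C hD hC
    rw [List.foldl_cons, pv_stepB]
    set h := (pvPartHash c).1 with hh
    set t := (pvPartHash c).2 with ht
    have hD' : List.Pairwise (· < ·) (if h ≠ "" then pvIns D h else D) := by
      split_ifs with h0
      · exact (pvIns_spec D h hD).1
      · exact hD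
    have hC' : List.Pairwise (· < ·) (if t ≠ "" then pvIns C t else C) := by
      split_ifs with h0
      · exact (pvIns_spec C t hC).1
      · exact hC
    obtain ⟨P1, P2, M1, M2⟩ := ih _ _ hD' hC'
    refine ⟨P1, P2, fun y => ?_, fun y => ?_⟩
    · rw [M1 y, List.map_cons, List.filter_cons]
      by_cases hne : h = ""
      · simp [← hh, hne]
      · have hI := (pvIns_spec D h hD).2 y
        simp only [← hh, if_pos hne, if_pos (by simpa using hne : decide (h ≠ "") = true), hI,
          List.mem_cons]
        tauto
    · rw [M2 y, List.map_cons, List.filter_cons]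
      by_cases hne : t = ""
      · simp [← ht, hne]
      · have hI := (pvIns_spec C t hC).2 y
        simp only [← ht, if_pos hne, if_pos (by simpa using hne : decide (t ≠ "") = true), hI,
          List.mem_cons]
        tauto

lemma pv_sorted_eq (L D : List String) (hP : List.Pairwise (· < ·) D)
    (hm : ∀ y, y ∈ D ↔ y ∈ L) :
    PySem.List.sorted (PySem.Set.ofList L) (fun x => x) false = D := by
  apply PySem.List.sorted_eq_of_perm_of_pairwise_lt
  · apply List.perm_of_nodup_nodup_toFinset_eq (hP.imp ne_of_lt) (PySem.Set.nodup_ofList L)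
    ext a
    simp [List.mem_toFinset, hm, PySem.Set.mem_ofList]
  · exact hP

-- ===== VERDICT (by name: the statement is the Claim_ definition above) =====
theorem parse_citation_refs_py_spec : Claim_equal_parse_citation_refs_py := by
  intro citations _
  unfold Spec_parse_citation_refs_py parse_citation_refs_py
  rw [pv_foldA citations [] []]
  have halt : parse_citation_refs_py_alt citations = citations.foldl pvStepFn ([], []) := rfl
  rw [halt]
  obtain ⟨hP1, hP2, hM1, hM2⟩ := pv_foldB citations [] [] List.Pairwise.nil List.Pairwise.nil
  refine Prod.ext ?_ ?_
  · exact pv_sorted_eq _ _ hP1 (fun y => by rw [hM1 y]; simp)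
  · exact pv_sorted_eq _ _ hP2 (fun y => by rw [hM2 y]; simp)
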